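-- pv_equiv track=rewrite | github.com/Sophoca/PS | 프로그래머스/위장.py | solution
-- ===== SOURCE A (Python) =====
-- def solution(clothes):
--     answer = 1
--     comb = dict()
--     for cloth in clothes:
--         if cloth[1] not in comb:
--             comb[cloth[1]] = []
--         comb[cloth[1]].append(cloth[0])
--     for num in comb.values():
--         answer *= len(num)
--
--     return answer - 1
-- ===== SOURCE B (Python) =====
-- def solution(clothes):
--     # sort just the category keys, then multiply run lengths in one pass
--     keys = sorted(cloth[1] for cloth in clothes)
--     answer = 1
--     i, n = 0, len(keys)
--     while i < n:
--         j = i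
--         while j < n and keys[j] == keys[i]:
--             j += 1
--         answer *= j - i
--         i = j
--     return answer - 1
-- ===== Notes on version B (the rewrite author's own statement) =====
-- stated objective: alternative
-- what changed: Replaces A's dict-of-lists grouping (hash map from category to item list, then product of list lengths) by sorting the category keys and multiplying the lengths of equal-key runs in a single scan.
import Mathlib
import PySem

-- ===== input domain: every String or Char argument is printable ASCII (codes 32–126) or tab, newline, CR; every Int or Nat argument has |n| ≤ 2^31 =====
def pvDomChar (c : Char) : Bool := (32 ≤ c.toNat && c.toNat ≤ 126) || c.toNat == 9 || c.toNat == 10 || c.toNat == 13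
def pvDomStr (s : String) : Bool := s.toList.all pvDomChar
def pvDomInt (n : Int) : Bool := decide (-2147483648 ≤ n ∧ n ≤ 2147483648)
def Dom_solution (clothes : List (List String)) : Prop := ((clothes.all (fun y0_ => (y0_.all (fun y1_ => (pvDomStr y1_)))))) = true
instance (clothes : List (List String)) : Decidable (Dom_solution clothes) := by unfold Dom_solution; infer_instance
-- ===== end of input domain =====

-- B groups by sorting the category keys and multiplying the run lengths, instead of A's dict-of-lists grouping; return values only (no mutation in either).

-- ===== PORT A =====
def solution (clothes : List (List String)) : Int :=
  let comb := clothes.foldl (fun comb cloth =>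
    let k := PySem.List.pyGetD cloth 1 ""
    let comb' := if comb.contains k then comb else comb.insert k ([] : List String)
    comb'.modify k [] (fun xs => xs ++ [PySem.List.pyGetD cloth 0 ""])) PySem.Dict.empty
  let answer := comb.values.foldl (fun a num => a * (num.length : Int)) 1
  answer - 1

-- ===== PORT B =====
-- the two nested while loops of Source B: outer loop = recursion over the sorted key list,
-- inner loop (advance j while the key is unchanged) = takeWhile/dropWhile of the current run
def runProd : List String → Int
  | [] => 1
  | k :: rest =>
    ((rest.takeWhile (fun x => x == k)).length + 1 : Int) *
      runProd (rest.dropWhile (fun x => x == k))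
  termination_by l => l.length
  decreasing_by
    simpa using Nat.lt_succ_of_le (List.length_dropWhile_le _ _)

def solution_alt (clothes : List (List String)) : Int :=
  runProd (PySem.List.sorted (clothes.map (fun c => PySem.List.pyGetD c 1 "")) (fun s => s) false) - 1

-- ===== PRECONDITION & SPEC =====
-- Pre_ excludes exactly the inputs where some cloth has fewer than 2 entries: there Python A
-- raises IndexError on cloth[1] (and Python B raises there too).
def Pre_solution (clothes : List (List String)) : Prop :=
  ∀ c ∈ clothes, 2 ≤ c.length
instance (clothes : List (List String)) : Decidable (Pre_solution clothes) := by
  unfold Pre_solution; infer_instance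
def pvWitness_solution : List (List String) := [["a", "x"], ["b", "x"], ["c", "y"]]

def Spec_solution (clothes : List (List String)) (out : Int) : Prop := out = solution_alt clothes
instance (clothes : List (List String)) (out : Int) : Decidable (Spec_solution clothes out) := by unfold Spec_solution; infer_instance

-- ===== CLAIM (what is proved, stated in full; the proofs are below) =====
def Claim_equal_solution : Prop := ∀ (clothes : List (List String)), Dom_solution clothes → Pre_solution clothes → Spec_solution clothes (solution clothes)

-- ===== LEMMAS AND PROOFS =====

-- the common value both programs compute (before the final -1):
-- the product over the distinct category keys of their multiplicities
def pvG (l : List String) : Int := ∏ k ∈ l.toFinset, (l.count k : Int)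

theorem pvG_perm {l l' : List String} (h : l.Perm l') : pvG l = pvG l' := by
  unfold pvG
  rw [List.toFinset_eq_of_perm l l' h]
  exact Finset.prod_congr rfl (fun k _ => by rw [h.count_eq])

-- ---- A side ----

theorem stepEq (d : PySem.Dict String (List String)) (k : String) (f : List String → List String)
    (h : d.contains k = false) :
    (d.insert k []).modify k [] f = d.modify k [] f := by
  simp only [PySem.Dict.modify, PySem.Dict.getD_insert_self, PySem.Dict.insert_insert_self,
    PySem.Dict.getD_of_not_contains d ([] : List String) h]

theorem pv_foldl_fun_congr {α β : Type} (f g : β → α → β) (i : β) (l : List α)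
    (h : ∀ d c, f d c = g d c) : l.foldl f i = l.foldl g i := by
  induction l generalizing i with
  | nil => rfl
  | cons c t ih => simp only [List.foldl_cons, h, ih]

-- inserting-if-absent then appending is the modify-with-default-[] loop
theorem foldA_eq (clothes : List (List String)) :
    clothes.foldl (fun comb cloth =>
      let k := PySem.List.pyGetD cloth 1 ""
      let comb' := if comb.contains k then comb else comb.insert k ([] : List String)
      comb'.modify k [] (fun xs => xs ++ [PySem.List.pyGetD cloth 0 ""])) PySem.Dict.empty
    = clothes.foldl (fun d c =>
        d.modify (PySem.List.pyGetD c 1 "") [] (fun xs => xs ++ [PySem.List.pyGetD c 0 ""]))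
        PySem.Dict.empty := by
  apply pv_foldl_fun_congr
  intro d c
  by_cases h : d.contains (PySem.List.pyGetD c 1 "")
  · simp [h]
  · simp only [Bool.not_eq_true] at h
    simp [h, stepEq]

theorem foldl_mul (l : List String) (f : String → Int) (i : Int) :
    l.foldl (fun a x => a * f x) i = i * (l.map f).prod := by
  induction l generalizing i with
  | nil => simp
  | cons x t ih => simp [List.foldl_cons, ih, mul_assoc]

theorem solution_eq_pvG (clothes : List (List String)) :
    solution clothes = pvG (clothes.map (fun c => PySem.List.pyGetD c 1 "")) - 1 := by
  unfold solution
  rw [foldA_eq]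
  set cats := clothes.map (fun c => PySem.List.pyGetD c 1 "") with hcats
  set d := clothes.foldl (fun d c =>
      d.modify (PySem.List.pyGetD c 1 "") [] (fun xs => xs ++ [PySem.List.pyGetD c 0 ""]))
      PySem.Dict.empty with hd
  show (d.values.foldl (fun a num => a * (num.length : Int)) 1) - 1 = pvG cats - 1
  have hnodup : d.keys.Nodup := by
    rw [hd]
    exact PySem.Dict.nodup_keys_foldl_modify_key clothes _ _ _ _ (by simp [PySem.Dict.empty, PySem.Dict.keys])
  have hkeysmem : ∀ k, k ∈ d.keys ↔ k ∈ cats := by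
    intro k
    rw [hd, PySem.Dict.keys_foldl_modify_key clothes (fun c => PySem.List.pyGetD c 1 "") ([] : List String)
      (fun d c => fun xs => xs ++ [PySem.List.pyGetD c 0 ""]) PySem.Dict.empty]
    rw [PySem.Set.mem_update]
    simp [PySem.Dict.empty, PySem.Dict.keys, hcats]
  have hgetD : ∀ k, d.getD k [] = ((clothes.map (fun c => (PySem.List.pyGetD c 1 "", PySem.List.pyGetD c 0 ""))).filter (fun p => p.1 == k)).map (fun p => p.2) := by
    intro k
    rw [hd]
    have h := PySem.Dict.getD_foldl_modify_append
      (clothes.map (fun c => (PySem.List.pyGetD c 1 "", PySem.List.pyGetD c 0 "")))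
      (PySem.Dict.empty : PySem.Dict String (List String)) k
    simp only [List.foldl_map] at h
    simpa using h
  have hlen : ∀ k, ((d.getD k []).length : Int) = (cats.count k : Int) := by
    intro k
    rw [hgetD k, hcats]
    simp only [List.length_map]
    rw [List.count_eq_countP, List.countP_map, ← List.countP_eq_length_filter, List.countP_map]
    rfl
  rw [PySem.Dict.values_eq_map_keys d hnodup ([] : List String)]
  simp only [List.foldl_map]
  rw [foldl_mul d.keys (fun k => ((d.getD k []).length : Int)) 1, one_mul]
  have h1 : (d.keys.map (fun k => ((d.getD k []).length : Int))).prod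
      = ∏ k ∈ d.keys.toFinset, ((d.getD k []).length : Int) :=
    (List.prod_toFinset _ hnodup).symm
  have h2 : d.keys.toFinset = cats.toFinset := by
    ext k
    simp [hkeysmem k]
  rw [h1, h2]
  unfold pvG
  congr 1
  exact Finset.prod_congr rfl (fun k _ => hlen k)

-- ---- B side ----

theorem runProd_eq_pvG (l : List String) (hp : l.Pairwise (· ≤ ·)) : runProd l = pvG l := by
  induction l using runProd.induct with
  | case1 => simp [runProd, pvG]
  | case2 k rest ih =>
    have hrest : rest.Pairwise (· ≤ ·) := hp.of_cons
    have hk : ∀ x ∈ rest, k ≤ x := fun x hx => (List.pairwise_cons.mp hp).1 x hx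
    set run := rest.takeWhile (fun x => x == k) with hrun
    set rest' := rest.dropWhile (fun x => x == k) with hrest'
    have hsplit : run ++ rest' = rest := List.takeWhile_append_dropWhile
    have hrunk : ∀ x ∈ run, x = k := by
      intro x hx
      simpa using List.mem_takeWhile_imp hx
    have hne : ∀ x ∈ rest', x ≠ k := by
      cases h : rest' with
      | nil => simp
      | cons h' t' =>
        intro x hx
        have hh' : ¬ (h' == k) = true := by
          have := List.head_dropWhile_not (fun x => x == k) (l := rest) (by rw [← hrest', h]; simp)
          simpa [← hrest', h] using this
        have hh'ne : h' ≠ k := by simpa using hh'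
        have hh'mem : h' ∈ rest := by
          have hm : h' ∈ rest' := by rw [h]; simp
          exact (List.dropWhile_sublist (fun x => x == k)).subset (hrest' ▸ hm)
        have hkh' : k < h' := lt_of_le_of_ne (hk h' hh'mem) (Ne.symm hh'ne)
        have hpw' : rest'.Pairwise (· ≤ ·) := hrest'.symm ▸ hrest.sublist (List.dropWhile_sublist _)
        rcases List.mem_cons.mp hx with hx | hx
        · exact hx ▸ hh'ne
        · have hle : h' ≤ x := by
            rw [h] at hpw'
            exact (List.pairwise_cons.mp hpw').1 x hx
          exact fun he => absurd (he ▸ hle) (not_le.mpr hkh')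
    have hknotin : k ∉ rest' := fun h => (hne k h) rfl
    have hcount : (k :: rest).count k = run.length + 1 := by
      rw [← hsplit]
      have c1 : run.count k = run.length := List.count_eq_length.mpr (fun x hx => by simp [hrunk x hx])
      have c2 : rest'.count k = 0 := List.count_eq_zero.mpr hknotin
      simp [List.count_append, c1, c2]
    have hfin : (k :: rest).toFinset = insert k rest'.toFinset := by
      ext x
      simp only [List.mem_toFinset, List.mem_cons, Finset.mem_insert, ← hsplit, List.mem_append]
      constructor
      · rintro (h | h | h)
        · exact Or.inl h
        · exact Or.inl (hrunk x h)
        · exact Or.inr (by simpa using h)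
      · rintro (h | h)
        · exact Or.inl h
        · exact Or.inr (Or.inr (by simpa using h))
    have hcount' : ∀ x ∈ rest'.toFinset, (k :: rest).count x = rest'.count x := by
      intro x hx
      have hxne : x ≠ k := fun he => hknotin (he ▸ List.mem_toFinset.mp hx)
      have hxrun : x ∉ run := fun h => hxne (hrunk x h)
      rw [← hsplit]
      simp [List.count_append, Ne.symm hxne,
        List.count_eq_zero.mpr hxrun]
    have hpw' : rest'.Pairwise (· ≤ ·) := hrest'.symm ▸ hrest.sublist (List.dropWhile_sublist _)
    rw [runProd]
    rw [ih hpw']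
    unfold pvG
    rw [hfin, Finset.prod_insert (by simpa using hknotin)]
    rw [hcount]
    congr 1
    · exact (Finset.prod_congr rfl (fun x hx => by rw [hcount' x hx])).symm

-- ===== VERDICT (by name: the statement is the Claim_ definition above) =====
theorem solution_spec : Claim_equal_solution := by
  intro clothes _hdom _hpre
  unfold Spec_solution solution_alt
  rw [solution_eq_pvG]
  rw [runProd_eq_pvG _ (by simpa using PySem.List.sorted_pairwise (clothes.map (fun c => PySem.List.pyGetD c 1 "")) (fun s => s))]
  rw [pvG_perm (PySem.List.sorted_perm (clothes.map (fun c => PySem.List.pyGetD c 1 "")) (fun s => s) false)]
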